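-- pv_equiv track=rewrite | github.com/mfozmen/littlepress-ai | src/imposition.py | _booklet_order
-- ===== SOURCE A (Python) =====
-- def _reader_sequence(n_pages: int) -> list[int | None]:
--     """Return a reader-order list of length multiple-of-4 where padding
--     ``None`` slots land at the natural inside-cover positions of a
--     folded saddle-stitch booklet.
--
--     The source PDF produced by ``build_pdf`` is always structured as
--     ``[cover, story_1 .. story_k, back_cover]``. A printed booklet
--     must read in this physical order after folding:
--
--       * reader position 1 = outside front cover (source page 1)
--       * reader position ``total`` = outside back cover (source page n)
--       * story flows continuously between cover and back cover
--       * pad blanks land at positions 2 (inside-front-cover) and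
--         ``total - 1`` (inside-back-cover) when pad ≥ 2 — the
--         natural blank-page positions in a real children's book
--
--     Rule: if pad ≥ 1, position 2 is blank (inside-front-cover —
--     moves story 1 onto a recto). The remaining ``pad - 1`` blanks
--     stack at position ``total - 1`` and (when pad = 3) one more
--     just before it. Story pages fill positions 3..total-pad-1 in
--     order with no blank interruptions.
--
--     REAL-BOOK CONTEXT — why this is the right shape:
--
--     Saddle-stitch arithmetic forces ``pad`` blanks somewhere when
--     ``n_pages`` isn't a multiple of 4. There is no arrangement
--     that hides them. The CHOICE is where to place them:
--
--     * THIS rule (clean reading flow): blanks at position 2 and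
--       position total-1. Story flows uninterrupted between them.
--       Imposition pairs position 2 with position total-1 onto the
--       same physical sheet (the verso of the outer cover-sheet) —
--       so the imposed A4 PDF has one fully-blank A4 page. That page
--       becomes the inside-front-cover (left, blank) + inside-back-
--       cover (right, blank) when folded, which IS THE STANDARD
--       LAYOUT IN PRINTED CHILDREN'S BOOKS. Open any picture book —
--       the inside-front and inside-back covers are commonly blank.
--
--     * ALTERNATIVE (PR #82, reverted here): blanks distributed
--       across the imposition so every A4 page has at least one
--       content slot. Avoids the all-blank A4 page but interrupts
--       the story with blank-content spreads in the middle of the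
--       reading flow (S1 followed by blank, S2 followed by blank,
--       etc.). The user's 2026-04-28 review of the booklet rejected
--       this: "page 2's neighbor is blank, page 4 too — you were
--       supposed to only remove in-between blank pages."
--
--     The all-blank A4 page in the imposed PDF is the right answer:
--     it FOLDS to a clean inside-cover wrap. The on-screen view of
--     that A4 page looking blank is a print-time artefact, not a
--     bug.
--
--     Degenerate exception: pad = 2 with n_pages = 2 (cover + back
--     only, zero story) packs both blanks into the only sheet — the
--     user can't write a story-less book in practice; pinned in
--     tests.
--
--     If ``n_pages`` is already a multiple of 4 (pad = 0), no blanks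
--     are inserted — story 1 lands on the verso of the cover.
--     (Forcing a recto would cost a whole extra A4 sheet for
--     aesthetics.)
--     """
--     if n_pages < 2:
--         raise ValueError(
--             f"saddle-stitch imposition needs at least 2 source pages "
--             f"(cover + back cover); got n_pages={n_pages!r}. "
--             f"``build_pdf`` always emits cover + back cover, so this "
--             f"path is unreachable from the normal flow."
--         )
--     pad = (4 - n_pages % 4) % 4
--     if pad == 0:
--         return list(range(1, n_pages + 1))
--
--     # Cover at pos 1, back cover at pos total. One blank goes
--     # immediately after the cover (inside-front-cover / story-on-
--     # recto). The rest stack immediately before the back cover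
--     # (inside-back-cover and, for pad=3, the extra slot beside
--     # it). Story pages fill the contiguous middle.
--     before_back_cover = pad - 1
--     sequence: list[int | None] = [1, None]
--     sequence.extend(range(2, n_pages))
--     sequence.extend([None] * before_back_cover)
--     sequence.append(n_pages)
--     return sequence
--
-- def _booklet_order(n_pages: int) -> list[int | None]:
--     pages = _reader_sequence(n_pages)
--     total = len(pages)
--
--     order: list[int | None] = []
--     left = 0
--     right = total - 1
--     while left < right:
--         order.append(pages[right]); order.append(pages[left])
--         left += 1; right -= 1
--         order.append(pages[left]); order.append(pages[right])
--         left += 1; right -= 1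
--     return order
-- ===== SOURCE B (Python) =====
-- def _booklet_order(n_pages: int) -> list[int | None]:
--     if n_pages < 2:
--         raise ValueError(
--             f"saddle-stitch imposition needs at least 2 source pages "
--             f"(cover + back cover); got n_pages={n_pages!r}. "
--             f"``build_pdf`` always emits cover + back cover, so this "
--             f"path is unreachable from the normal flow."
--         )
--     pad = -n_pages % 4
--     total = n_pages + pad
--
--     def out_slot(i: int) -> int:
--         # reader position i (0-based) -> its index in the imposed output:
--         # front half goes to the two middle slots of its sheet, back half
--         # (measured from the end, j) to the two outer slots.
--         if 2 * i < total:
--             return 4 * (i // 2) + 1 + i % 2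
--         j = total - 1 - i
--         return 4 * (j // 2) + 3 * (j % 2)
--
--     order: list[int | None] = [None] * total
--     for p in range(1, n_pages + 1):
--         if pad == 0:
--             i = p - 1
--         elif p == 1:
--             i = 0
--         elif p == n_pages:
--             i = total - 1
--         else:
--             i = p
--         order[out_slot(i)] = p
--     return order
-- ===== Notes on version B (the rewrite author's own statement) =====
-- stated objective: alternative
-- what changed: B inverts the data flow: instead of materializing the padded reader sequence and gathering from it with an inward two-pointer loop, B allocates the output array and scatters each source page directly into its imposed slot via a closed-form position map (reader position -> output index); blank slots are never written and stay None.
import Mathlib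
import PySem

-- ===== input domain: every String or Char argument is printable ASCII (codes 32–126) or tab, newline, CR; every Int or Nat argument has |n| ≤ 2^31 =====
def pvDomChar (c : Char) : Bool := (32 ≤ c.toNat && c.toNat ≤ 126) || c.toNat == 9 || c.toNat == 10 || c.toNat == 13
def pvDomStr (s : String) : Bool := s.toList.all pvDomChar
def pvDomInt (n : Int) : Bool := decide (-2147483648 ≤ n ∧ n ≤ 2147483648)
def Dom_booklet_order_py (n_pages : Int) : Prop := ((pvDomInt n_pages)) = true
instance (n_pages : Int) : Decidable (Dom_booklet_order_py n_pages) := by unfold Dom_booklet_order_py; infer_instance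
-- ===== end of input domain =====

-- B inverts A's data flow: no intermediate padded reader-sequence list and no inward
-- two-pointer gather loop; B scatters each source page directly into its imposed output
-- slot via a closed-form position map, blanks staying None (objective: alternative).


-- ===== PORT A =====
-- _reader_sequence; the n_pages < 2 ValueError branch is excluded by Pre_.
def reader_sequence_py (n_pages : Int) : List (Option Int) :=
  let pad := PySem.Int.mod (4 - PySem.Int.mod n_pages 4) 4
  if pad = 0 then (PySem.List.pyRange 1 (n_pages + 1) 1).map some
  else
    let before_back_cover := pad - 1
    (([some 1, none] ++ (PySem.List.pyRange 2 n_pages 1).map some)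
       ++ List.replicate before_back_cover.toNat none) ++ [some n_pages]

-- the two-pointer while-loop; pages[left]/pages[right] are always in range during A's
-- run (proved below), so pyGetD with default none is exact here.
def boLoopA (pages : List (Option Int)) (left right : Int) (order : List (Option Int)) :
    List (Option Int) :=
  if left < right then
    let order := order ++ [PySem.List.pyGetD pages right none, PySem.List.pyGetD pages left none]
    let left := left + 1
    let right := right - 1
    let order := order ++ [PySem.List.pyGetD pages left none, PySem.List.pyGetD pages right none]
    boLoopA pages (left + 1) (right - 1) order
  else order
termination_by (right - left).toNat
decreasing_by omega

def booklet_order_py (n_pages : Int) : List (Option Int) :=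
  let pages := reader_sequence_py n_pages
  let total : Int := pages.length
  boLoopA pages 0 (total - 1) []

-- ===== PORT B =====
-- out_slot: reader position (0-based) -> index in the imposed output
def outSlotB (total i : Int) : Int :=
  if 2 * i < total then 4 * (PySem.Int.floordiv i 2) + 1 + PySem.Int.mod i 2
  else
    let j := total - 1 - i
    4 * (PySem.Int.floordiv j 2) + 3 * (PySem.Int.mod j 2)

-- the if/elif chain computing reader position i of source page p
def rposB (n_pages pad total p : Int) : Int :=
  if pad = 0 then p - 1
  else if p = 1 then 0
  else if p = n_pages then total - 1
  else p

-- 'order[k] = p': for every input admitted by Pre_ the written index satisfies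
-- 0 ≤ k < total (proved below), so List.set on the .toNat index is exact here.
def booklet_order_py_alt (n_pages : Int) : List (Option Int) :=
  let pad := PySem.Int.mod (-n_pages) 4
  let total := n_pages + pad
  (PySem.List.pyRange 1 (n_pages + 1) 1).foldl
    (fun order p => order.set (outSlotB total (rposB n_pages pad total p)).toNat (some p))
    (List.replicate total.toNat none)

-- ===== PRECONDITION & SPEC =====
-- A raises ValueError for n_pages < 2; those inputs are excluded.
def Pre_booklet_order_py (n_pages : Int) : Prop := 2 ≤ n_pages
instance (n_pages : Int) : Decidable (Pre_booklet_order_py n_pages) := by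
  unfold Pre_booklet_order_py; infer_instance
def pvWitness_booklet_order_py : Int := 6

def Spec_booklet_order_py (n_pages : Int) (out : List (Option Int)) : Prop :=
  out = booklet_order_py_alt n_pages
instance (n_pages : Int) (out : List (Option Int)) : Decidable (Spec_booklet_order_py n_pages out) := by
  unfold Spec_booklet_order_py; infer_instance

-- ===== CLAIM (what is proved, stated in full; the proofs are below) =====
def Claim_equal_booklet_order_py : Prop :=
  ∀ (n_pages : Int), Dom_booklet_order_py n_pages → Pre_booklet_order_py n_pages →
    Spec_booklet_order_py n_pages (booklet_order_py n_pages)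

-- ===== LEMMAS AND PROOFS =====

-- proof-side helpers: the value read at reader position i, and the reader position read
-- at output index k by A's gather loop
def slotP (n pad total i : Int) : Option Int :=
  if pad = 0 then some (i + 1)
  else if i = 0 then some 1
  else if i = 1 then none
  else if i < n then some i
  else if i = total - 1 then some n
  else none

def gIdx (total k : Int) : Int :=
  if k % 4 = 0 then total - 1 - 2 * (k / 4)
  else if k % 4 = 1 then 2 * (k / 4)
  else if k % 4 = 2 then 2 * (k / 4) + 1
  else total - 2 - 2 * (k / 4)

def gatherList (n pad total : Int) (m : Nat) : List (Option Int) :=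
  (List.range m).flatMap (fun (s : Nat) =>
    [slotP n pad total (total - 1 - 2 * (s : Int)), slotP n pad total (2 * (s : Int)),
     slotP n pad total (2 * (s : Int) + 1), slotP n pad total (total - 2 - 2 * (s : Int))])

theorem loop_eq (pages : List (Option Int)) :
    ∀ (m : Nat) (l : Int) (acc : List (Option Int)),
    boLoopA pages l (l + 4 * m - 1) acc
      = acc ++ (List.range m).flatMap (fun (s : Nat) =>
          [PySem.List.pyGetD pages (l + 4 * m - 1 - 2 * (s : Int)) none,
           PySem.List.pyGetD pages (l + 2 * (s : Int)) none,
           PySem.List.pyGetD pages (l + 2 * (s : Int) + 1) none,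
           PySem.List.pyGetD pages (l + 4 * m - 2 - 2 * (s : Int)) none])
  | 0, l, acc => by
      rw [boLoopA]; simp
  | (m+1), l, acc => by
      rw [boLoopA]
      rw [if_pos (by push_cast; omega)]
      dsimp only
      rw [show l + 4 * ((m : Nat) + 1 : Nat) - 1 - 1 - 1 = (l + 2) + 4 * (m : Int) - 1 by push_cast; ring]
      rw [show l + 1 + 1 = l + 2 by ring]
      rw [loop_eq pages m (l + 2)]
      rw [List.range_succ_eq_map]
      simp only [List.flatMap_cons, List.flatMap_map, List.append_assoc, List.cons_append,
        List.nil_append]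
      push_cast
      ring_nf

theorem get_reader (n : Int) (hn : 2 ≤ n) (i : Int) (h0 : 0 ≤ i)
    (hi : i < n + (4 - n % 4) % 4) :
    PySem.List.pyGetD (reader_sequence_py n) i none
      = slotP n ((4 - n % 4) % 4) (n + (4 - n % 4) % 4) i := by
  have h4 : (0:Int) < 4 := by norm_num
  set pad : Int := (4 - n % 4) % 4 with hpad
  have hpr : (0:Int) ≤ pad ∧ pad < 4 := by constructor <;> omega
  rw [reader_sequence_py]
  simp only [PySem.Int.mod_eq_emod_of_pos h4, ← hpad]
  by_cases hp0 : pad = 0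
  · rw [if_pos hp0]
    rw [show i = ((i.toNat : Nat) : Int) by omega]
    rw [PySem.List.pyGetD_map_pyRange_one some 1 (n+1) i.toNat none (by omega)]
    simp [slotP, hp0]
    omega
  · rw [if_neg hp0]
    have hM : ((PySem.List.pyRange 2 n 1).map some).length = (n - 2).toNat := by
      simp [PySem.List.length_pyRange_one]
    have hB1 : ([some 1, none] ++ (PySem.List.pyRange 2 n 1).map some).length = (n - 2).toNat + 2 := by
      simp [hM]
    have hA1 : (([some (1:Int), none] ++ (PySem.List.pyRange 2 n 1).map some)
        ++ List.replicate (pad - 1).toNat none).length = (n - 2).toNat + 2 + (pad - 1).toNat := by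
      simp [hM]; omega
    rw [PySem.List.pyGetD_eq_getElem _ none h0 (by simp [PySem.List.length_pyRange_one]; omega)]
    by_cases hlast : i = n + pad - 1
    · rw [List.getElem_append_right (by omega)]
      simp only [List.getElem_singleton]
      simp only [slotP]
      rw [if_neg hp0, if_neg (by omega), if_neg (by omega), if_neg (by omega), if_pos (by omega)]
    · have hlt : i.toNat < (n - 2).toNat + 2 + (pad - 1).toNat := by omega
      rw [List.getElem_append_left (by omega)]
      by_cases hin : i < n
      · rw [List.getElem_append_left (by omega)]
        by_cases hi0 : i = 0
        · subst hi0
          simp [slotP, hp0]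
        · by_cases hi1 : i = 1
          · subst hi1
            simp [slotP, hp0]
          · obtain ⟨k, hk⟩ : ∃ k, i.toNat = k + 2 := ⟨i.toNat - 2, by omega⟩
            simp only [hk, List.cons_append, List.getElem_cons_succ, List.nil_append]
            rw [List.getElem_map]
            rw [PySem.List.getElem_pyRange_one]
            simp only [slotP]
            rw [if_neg hp0, if_neg (by omega), if_neg (by omega), if_pos hin]
            congr 1
            omega
      · rw [List.getElem_append_right (by omega)]
        rw [List.getElem_replicate]
        simp only [slotP]
        rw [if_neg hp0, if_neg (by omega), if_neg (by omega), if_neg (by omega), if_neg (by omega)]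

theorem len_reader (n : Int) (hn : 2 ≤ n) :
    ((reader_sequence_py n).length : Int) = n + (4 - n % 4) % 4 := by
  have h4 : (0:Int) < 4 := by norm_num
  rw [reader_sequence_py]
  simp only [PySem.Int.mod_eq_emod_of_pos h4]
  by_cases hp0 : (4 - n % 4) % 4 = 0
  · rw [if_pos hp0]
    simp [PySem.List.length_pyRange_one]
    omega
  · rw [if_neg hp0]
    simp [PySem.List.length_pyRange_one]
    omega

-- A = gatherList
theorem a_eq_gather (n : Int) (hn : 2 ≤ n) (pad total : Int) (m : Nat)
    (hp : pad = (4 - n % 4) % 4) (ht : total = n + pad) (hm : (4 * m : Int) = total) :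
    booklet_order_py n = gatherList n pad total m := by
  have hlen := len_reader n hn
  show boLoopA (reader_sequence_py n) 0 (((reader_sequence_py n).length : Int) - 1) []
      = gatherList n pad total m
  rw [hlen, ← hp, ← ht, show total - 1 = 0 + 4 * (m : Int) - 1 by omega]
  rw [loop_eq, List.nil_append, gatherList]
  refine List.flatMap_congr ?_
  intro s hs
  have hsm : s < m := List.mem_range.mp hs
  have e1 : 0 + 4 * (m : Int) - 1 - 2 * (s : Int) = total - 1 - 2 * (s : Int) := by omega
  have e2 : 0 + 2 * (s : Int) = 2 * (s : Int) := by omega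
  have e3 : 0 + 2 * (s : Int) + 1 = 2 * (s : Int) + 1 := by omega
  have e4 : 0 + 4 * (m : Int) - 2 - 2 * (s : Int) = total - 2 - 2 * (s : Int) := by omega
  rw [e1, e3, e2, e4, hp, ht,
    get_reader n hn _ (by omega) (by omega),
    get_reader n hn _ (by omega) (by omega),
    get_reader n hn _ (by omega) (by omega),
    get_reader n hn _ (by omega) (by omega)]
  simp only [← hp]

theorem gather_len (n pad total : Int) (m : Nat) :
    (gatherList n pad total m).length = 4 * m := by
  induction m with
  | zero => rfl
  | succ m ih =>
      rw [gatherList, List.range_succ, List.flatMap_append, List.length_append]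
      rw [gatherList] at ih
      simp [ih]; ring

theorem gather_get (n pad total : Int) (m : Nat) (k : Nat) (hk : k < 4 * m) :
    (gatherList n pad total m)[k]? = some (slotP n pad total (gIdx total (k : Int))) := by
  induction m with
  | zero => omega
  | succ m ih =>
      rw [gatherList, List.range_succ, List.flatMap_append]
      rw [gatherList] at ih
      by_cases h : k < 4 * m
      · rw [List.getElem?_append_left (by rw [← gatherList, gather_len]; omega)]
        exact ih h
      · rw [List.getElem?_append_right (by rw [← gatherList, gather_len]; omega)]
        rw [← gatherList, gather_len]
        have hcast : ((4 * m : Nat) : Int) = 4 * (m : Int) := by push_cast; ring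
        rcases (by omega : k = 4 * m ∨ k = 4 * m + 1 ∨ k = 4 * m + 2 ∨ k = 4 * m + 3) with h0 | h1 | h2 | h3
        · subst h0
          simp only [Nat.sub_self, List.flatMap_cons, List.flatMap_nil, List.append_nil,
            List.getElem?_cons_zero]
          unfold gIdx
          rw [if_pos (by push_cast; omega)]
          congr 2
          push_cast; omega
        · subst h1
          simp only [show 4 * m + 1 - 4 * m = 1 by omega, List.flatMap_cons, List.flatMap_nil,
            List.append_nil, List.getElem?_cons_succ, List.getElem?_cons_zero]
          unfold gIdx
          rw [if_neg (by push_cast; omega), if_pos (by push_cast; omega)]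
          congr 2
          push_cast; omega
        · subst h2
          simp only [show 4 * m + 2 - 4 * m = 2 by omega, List.flatMap_cons, List.flatMap_nil,
            List.append_nil, List.getElem?_cons_succ, List.getElem?_cons_zero]
          unfold gIdx
          rw [if_neg (by push_cast; omega), if_neg (by push_cast; omega),
            if_pos (by push_cast; omega)]
          congr 2
          push_cast; omega
        · subst h3
          simp only [show 4 * m + 3 - 4 * m = 3 by omega, List.flatMap_cons, List.flatMap_nil,
            List.append_nil, List.getElem?_cons_succ, List.getElem?_cons_zero]
          unfold gIdx
          rw [if_neg (by push_cast; omega), if_neg (by push_cast; omega),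
            if_neg (by push_cast; omega)]
          congr 2
          push_cast; omega

-- generic scatter lemmas
theorem foldl_set_length (ps : List Int) (f : Int → Nat) (init : List (Option Int)) :
    (ps.foldl (fun acc p => acc.set (f p) (some p)) init).length = init.length := by
  induction ps generalizing init with
  | nil => rfl
  | cons q rest ih => simp [List.foldl_cons, ih]

theorem foldl_set_ne (ps : List Int) (f : Int → Nat) (init : List (Option Int)) (k : Nat)
    (h : ∀ p ∈ ps, f p ≠ k) :
    (ps.foldl (fun acc p => acc.set (f p) (some p)) init)[k]? = init[k]? := by
  induction ps generalizing init with
  | nil => rfl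
  | cons q rest ih =>
      rw [List.foldl_cons, ih _ (fun p hp => h p (List.mem_cons_of_mem _ hp))]
      exact List.getElem?_set_ne (h q (List.mem_cons_self))

theorem foldl_set_hit (ps : List Int) (f : Int → Nat) (init : List (Option Int)) (k : Nat)
    (p : Int) (hp : p ∈ ps) (hfp : f p = k) (huniq : ∀ q ∈ ps, f q = k → q = p)
    (hk : k < init.length) :
    (ps.foldl (fun acc p => acc.set (f p) (some p)) init)[k]? = some (some p) := by
  induction ps generalizing init with
  | nil => cases hp
  | cons q rest ih =>
      rw [List.foldl_cons]
      by_cases hmem : ∃ r ∈ rest, f r = k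
      · obtain ⟨r, hr, hfr⟩ := hmem
        have hrp : r = p := huniq r (List.mem_cons_of_mem _ hr) hfr
        subst hrp
        exact ih (init.set (f q) (some q)) hr
          (fun q' hq' h' => huniq q' (List.mem_cons_of_mem _ hq') h') (by simpa using hk)
      · have hne : ∀ r ∈ rest, f r ≠ k := fun r hr h' => hmem ⟨r, hr, h'⟩
        have hpq : p = q := by
          rcases List.mem_cons.mp hp with h' | h'
          · exact h'
          · exact absurd hfp (hne p h')
        subst hpq
        rw [foldl_set_ne rest f _ k hne, hfp]
        exact List.getElem?_set_self (by simpa using hk)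

-- arithmetic facts about the position maps (after unfolding floordiv/mod to ediv/emod)
theorem outSlot_range_inv (total i : Int) (hm4 : total % 4 = 0) (h0 : 0 ≤ i) (hi : i < total) :
    0 ≤ outSlotB total i ∧ outSlotB total i < total ∧ gIdx total (outSlotB total i) = i := by
  have h2 : (0:Int) < 2 := by norm_num
  unfold outSlotB gIdx
  simp only [PySem.Int.floordiv_eq_ediv_of_pos h2, PySem.Int.mod_eq_emod_of_pos h2]
  split_ifs <;> omega

theorem rpos_slot (n pad total p : Int) (hn : 2 ≤ n) (hp : pad = (4 - n % 4) % 4)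
    (ht : total = n + pad) (h1 : 1 ≤ p) (h2 : p ≤ n) :
    0 ≤ rposB n pad total p ∧ rposB n pad total p < total ∧
      slotP n pad total (rposB n pad total p) = some p := by
  unfold rposB slotP
  split_ifs <;> refine ⟨by omega, by omega, ?_⟩ <;> first | rfl | (congr 1; omega)

theorem slot_some_rpos (n pad total i p : Int) (hn : 2 ≤ n) (hp : pad = (4 - n % 4) % 4)
    (ht : total = n + pad) (h0 : 0 ≤ i) (hi : i < total)
    (h : slotP n pad total i = some p) :
    1 ≤ p ∧ p ≤ n ∧ rposB n pad total p = i := by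
  unfold slotP at h
  unfold rposB
  split_ifs at h <;> injection h with h <;> subst h <;> split_ifs <;> omega

-- B = per-index closed form
theorem b_get (n : Int) (hn : 2 ≤ n) (pad total : Int)
    (hp : pad = (4 - n % 4) % 4) (ht : total = n + pad) (k : Nat) (hk : (k : Int) < total) :
    (booklet_order_py_alt n)[k]? = some (slotP n pad total (gIdx total (k : Int))) := by
  have h4 : (0:Int) < 4 := by norm_num
  have hpad2 : PySem.Int.mod (-n) 4 = pad := by
    rw [PySem.Int.mod_eq_emod_of_pos h4]; omega
  have hm4 : total % 4 = 0 := by omega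
  have hgi : 0 ≤ gIdx total (k : Int) ∧ gIdx total (k : Int) < total ∧
      outSlotB total (gIdx total (k : Int)) = (k : Int) := by
    have h2 : (0:Int) < 2 := by norm_num
    unfold gIdx outSlotB
    simp only [PySem.Int.floordiv_eq_ediv_of_pos h2, PySem.Int.mod_eq_emod_of_pos h2]
    split_ifs <;> omega
  set i : Int := gIdx total (k : Int) with hidef
  show ((PySem.List.pyRange 1 (n + 1) 1).foldl
    (fun order p => order.set (outSlotB (n + PySem.Int.mod (-n) 4)
        (rposB n (PySem.Int.mod (-n) 4) (n + PySem.Int.mod (-n) 4) p)).toNat (some p))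
    (List.replicate (n + PySem.Int.mod (-n) 4).toNat none))[k]? = some (slotP n pad total i)
  rw [hpad2, ← ht]
  cases hslot : slotP n pad total i with
  | none =>
      rw [foldl_set_ne]
      · rw [List.getElem?_replicate]
        simp only [if_pos (by omega : k < total.toNat)]
      · intro p hp' hf
        have hmem := (PySem.List.mem_pyRange_one.mp hp')
        obtain ⟨hr0, hr1, hr2⟩ := rpos_slot n pad total p hn hp ht (by omega) (by omega)
        obtain ⟨hs0, hs1, hs2⟩ := outSlot_range_inv total (rposB n pad total p) hm4 hr0 hr1
        have : outSlotB total (rposB n pad total p) = (k : Int) := by omega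
        have hri : rposB n pad total p = i := by rw [hidef, ← this, hs2]
        rw [hri, hslot] at hr2
        cases hr2
  | some p =>
      obtain ⟨hp1, hp2, hpr⟩ := slot_some_rpos n pad total i p hn hp ht hgi.1 hgi.2.1 hslot
      refine foldl_set_hit _ _ _ _ p (PySem.List.mem_pyRange_one.mpr ⟨by omega, by omega⟩) ?_ ?_ ?_
      · rw [hpr, hgi.2.2]; omega
      · intro q hq hfq
        have hmem := PySem.List.mem_pyRange_one.mp hq
        obtain ⟨hr0, hr1, hr2⟩ := rpos_slot n pad total q hn hp ht (by omega) (by omega)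
        obtain ⟨hs0, hs1, hs2⟩ := outSlot_range_inv total (rposB n pad total q) hm4 hr0 hr1
        have : outSlotB total (rposB n pad total q) = (k : Int) := by omega
        have hri : rposB n pad total q = i := by rw [hidef, ← this, hs2]
        rw [hri, hslot] at hr2
        injection hr2 with h'
        omega
      · simp; omega

theorem b_len (n : Int) : (booklet_order_py_alt n).length = (n + (4 - n % 4) % 4).toNat := by
  have h4 : (0:Int) < 4 := by norm_num
  have hpad2 : PySem.Int.mod (-n) 4 = (4 - n % 4) % 4 := by
    rw [PySem.Int.mod_eq_emod_of_pos h4]; omega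
  show ((PySem.List.pyRange 1 (n + 1) 1).foldl _ (List.replicate (n + PySem.Int.mod (-n) 4).toNat none)).length = _
  rw [foldl_set_length, List.length_replicate, hpad2]

theorem main_eq (n : Int) (hn : 2 ≤ n) : booklet_order_py n = booklet_order_py_alt n := by
  set pad : Int := (4 - n % 4) % 4 with hpad
  set total : Int := n + pad with htotal
  obtain ⟨m, hm⟩ : ∃ m : Nat, (4 * m : Int) = total := ⟨(total / 4).toNat, by omega⟩
  rw [a_eq_gather n hn pad total m hpad htotal hm]
  apply List.ext_getElem?
  intro k
  by_cases hk : (k : Int) < total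
  · rw [gather_get n pad total m k (by omega), b_get n hn pad total hpad htotal k hk]
  · rw [List.getElem?_eq_none (by rw [gather_len]; omega),
      List.getElem?_eq_none (by rw [b_len n]; omega)]

-- ===== VERDICT (by name: the statement is the Claim_ definition above) =====
theorem booklet_order_py_spec : Claim_equal_booklet_order_py := by
  intro n _ hpre
  show booklet_order_py n = booklet_order_py_alt n
  exact main_eq n hpre
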